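-- pv_equiv track=rewrite | github.com/JacktheFowler/learn-DataStruct | leetcode/check_case.py | solve
-- ===== SOURCE A (Python) =====
-- def MapLow(word):
--     a='aeiou'
--     res=[]
--     for i in word:
--         if i in a:
--             res.append('a')
--         else:
--             res.append(i)
--     return ''.join(res)
--
-- def solve(wordlist, queries):
--     a='aeiou'
--     res=[0]*len(queries)
--     for idx, i in enumerate(queries):
--         # 检验完全匹配
--         for j in wordlist:
--             if i==j:
--                 res[idx]=j
--                 break
--         else:
--             # 检验大小写匹配
--             for j in wordlist:
--                 if i.lower()==j.lower():
--                     res[idx]=j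
--                     break
--             else:
--                 # 检验元音匹配
--                 for j in wordlist:
--                     if MapLow(j.lower())==MapLow(i.lower()):
--                         res[idx]=j
--                         break
--                 else:
--                     res[idx]=''
--     return res
-- ===== SOURCE B (Python) =====
-- def solve(wordlist, queries):
--     table = str.maketrans('aeiou', 'aaaaa')
--     exact = set(wordlist)
--     low = {}
--     for w in wordlist:
--         low.setdefault(w.lower(), w)
--     dev = {}
--     for w in wordlist:
--         dev.setdefault(w.lower().translate(table), w)
--     def check(q):
--         if q in exact:
--             return q
--         lq = q.lower()
--         w = low.get(lq)
--         return w if w is not None else dev.get(lq.translate(table), '')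
--     return [check(q) for q in queries]
-- ===== Notes on version B (the rewrite author's own statement) =====
-- stated objective: faster
-- what changed: Replaces the three nested linear scans per query with precomputed hash structures (a set of words, a lowercase->first-word dict, a devoweled->first-word dict) so each query is answered by O(L) lookups.
import Mathlib
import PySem

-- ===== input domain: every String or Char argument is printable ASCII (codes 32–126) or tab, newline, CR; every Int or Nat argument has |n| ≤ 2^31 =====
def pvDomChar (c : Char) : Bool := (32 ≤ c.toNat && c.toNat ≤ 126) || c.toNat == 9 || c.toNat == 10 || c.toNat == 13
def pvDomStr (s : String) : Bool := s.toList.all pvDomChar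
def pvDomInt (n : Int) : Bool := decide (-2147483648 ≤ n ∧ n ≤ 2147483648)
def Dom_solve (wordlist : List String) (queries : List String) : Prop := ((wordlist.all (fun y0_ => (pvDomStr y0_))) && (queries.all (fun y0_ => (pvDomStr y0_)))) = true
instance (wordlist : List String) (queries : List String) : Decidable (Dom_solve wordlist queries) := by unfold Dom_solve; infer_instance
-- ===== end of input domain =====

-- B replaces A's three linear scans per query by precomputed lookup structures
-- (word set, lowercase dict, devoweled dict); a timing run measures the speed-up.

-- ===== PORT A =====
-- MapLow: build the char list by appending, then join (as A does)
def mapLow (word : String) : String :=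
  String.ofList (word.toList.foldl
    (fun res i => res ++ [if ("aeiou".toList).contains i then 'a' else i]) [])

-- the three for-else scans of A, each a first-match search over wordlist
def solve (wordlist : List String) (queries : List String) : List String :=
  queries.map (fun i =>
    match wordlist.find? (fun j => i == j) with
    | some j => j
    | none =>
      match wordlist.find? (fun j => PySem.Str.lower i == PySem.Str.lower j) with
      | some j => j
      | none =>
        match wordlist.find? (fun j => mapLow (PySem.Str.lower j) == mapLow (PySem.Str.lower i)) with
        | some j => j
        | none => "")

-- ===== PORT B =====
-- str.translate with maketrans('aeiou','aaaaa'): a per-character map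
def devowel (word : String) : String :=
  String.ofList (word.toList.map (fun c => if ("aeiou".toList).contains c then 'a' else c))

def solve_alt (wordlist : List String) (queries : List String) : List String :=
  let exact : PySem.Set String := PySem.Set.ofList wordlist
  let low := wordlist.foldl
    (fun d w => d.setdefault (PySem.Str.lower w) w) (PySem.Dict.empty : PySem.Dict String String)
  let dev := wordlist.foldl
    (fun d w => d.setdefault (devowel (PySem.Str.lower w)) w) (PySem.Dict.empty : PySem.Dict String String)
  queries.map (fun q =>
    if PySem.Set.contains exact q then q
    else
      match low.get? (PySem.Str.lower q) with
      | some w => w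
      | none => (dev.get? (devowel (PySem.Str.lower q))).getD "")

-- ===== PRECONDITION & SPEC =====
def Spec_solve (wordlist : List String) (queries : List String) (out : List String) : Prop := out = solve_alt wordlist queries
instance (wordlist : List String) (queries : List String) (out : List String) : Decidable (Spec_solve wordlist queries out) := by unfold Spec_solve; infer_instance

-- ===== CLAIM (what is proved, stated in full; the proofs are below) =====
def Claim_equal_solve : Prop := ∀ (wordlist : List String) (queries : List String), Dom_solve wordlist queries → Spec_solve wordlist queries (solve wordlist queries)

-- ===== LEMMAS AND PROOFS =====

-- A's MapLow equals B's devowel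
theorem mapLow_eq_devowel (word : String) : mapLow word = devowel word := by
  unfold mapLow devowel
  rw [PySem.List.foldl_append_singleton_eq_map, List.nil_append]

-- setdefault through get?: first write wins
theorem get?_setdefault (d : PySem.Dict String String) (k k' : String) (v : String) :
    (d.setdefault k' v).get? k =
      match d.get? k with
      | some w => some w
      | none => if k = k' then some v else none := by
  by_cases h : d.contains k' = true
  · rw [PySem.Dict.setdefault_of_contains _ _ h]
    cases hg : d.get? k with
    | some w => simp
    | none =>
      by_cases hk : k = k'
      · subst hk
        rw [PySem.Dict.contains_eq_isSome_get?, hg] at h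
        simp at h
      · simp [hk]
  · rw [PySem.Dict.setdefault_of_not_contains _ _ (by simpa using h)]
    rw [PySem.Dict.get?_insert]
    cases hg : d.get? k with
    | some w =>
      by_cases hk : k = k'
      · subst hk
        rw [PySem.Dict.contains_eq_isSome_get?, hg] at h
        simp at h
      · simp [hk]
    | none => simp

-- a setdefault loop keyed by `key` looks up as: old value, else first list element with that key
theorem get?_foldl_setdefault (key : String → String) (l : List String)
    (d : PySem.Dict String String) (k : String) :
    (l.foldl (fun d w => d.setdefault (key w) w) d).get? k =
      match d.get? k with
      | some w => some w
      | none => l.find? (fun w => key w == k) := by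
  induction l generalizing d with
  | nil => cases hg : d.get? k <;> simp [hg]
  | cons w rest ih =>
    simp only [List.foldl_cons, List.find?]
    rw [ih, get?_setdefault]
    cases hg : d.get? k with
    | some x => simp
    | none =>
      simp only
      by_cases hk : k = key w
      · simp [hk]
      · have : (key w == k) = false := by simp [Ne.symm hk]
        simp [hk, this]

-- A's exact-match scan
theorem find?_beq_self (i : String) (l : List String) :
    l.find? (fun j => i == j) = if i ∈ l then some i else none := by
  induction l with
  | nil => simp
  | cons j rest ih =>
    by_cases h : i = j
    · subst h; simp
    · have hb : (i == j) = false := by simp [h]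
      simp [List.find?, hb, ih, h]

-- find? respects pointwise-equal predicates
theorem find?_ext (p q : String → Bool) (l : List String) (h : ∀ x, p x = q x) :
    l.find? p = l.find? q := by
  induction l with
  | nil => rfl
  | cons a t ih => simp only [List.find?, h a, ih]

theorem solve_eq_alt (wordlist : List String) (queries : List String) :
    solve wordlist queries = solve_alt wordlist queries := by
  unfold solve solve_alt
  apply List.map_congr_left
  intro q _
  rw [find?_beq_self]
  by_cases hmem : q ∈ wordlist
  · simp [hmem, PySem.Set.contains, List.contains_eq_mem, PySem.Set.mem_ofList]
  · have hc : PySem.Set.contains (PySem.Set.ofList wordlist) q = false := by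
      simp [PySem.Set.contains, List.contains_eq_mem, PySem.Set.mem_ofList, hmem]
    simp only [hmem, if_false, hc, Bool.false_eq_true]
    rw [get?_foldl_setdefault, get?_foldl_setdefault]
    simp only [PySem.Dict.get?_empty]
    have h1 : (wordlist.find? (fun w => PySem.Str.lower w == PySem.Str.lower q)) =
        (wordlist.find? (fun j => PySem.Str.lower q == PySem.Str.lower j)) := by
      apply find?_ext; intro w; simp [eq_comm]
    have h2 : (wordlist.find? (fun w => devowel (PySem.Str.lower w) == devowel (PySem.Str.lower q))) =
        (wordlist.find? (fun j => mapLow (PySem.Str.lower j) == mapLow (PySem.Str.lower q))) := by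
      apply find?_ext; intro w; simp [mapLow_eq_devowel]
    rw [h1, h2]
    cases wordlist.find? (fun j => PySem.Str.lower q == PySem.Str.lower j) with
    | some w => simp
    | none =>
      simp only
      cases wordlist.find? (fun j => mapLow (PySem.Str.lower j) == mapLow (PySem.Str.lower q)) with
      | some w => simp
      | none => simp

-- ===== VERDICT (by name: the statement is the Claim_ definition above) =====
theorem solve_spec : Claim_equal_solve := by
  intro wordlist queries _
  unfold Spec_solve
  exact solve_eq_alt wordlist queries
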